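-- pv_equiv track=rewrite | github.com/blendnet-ai/skylearn-django-lms | practice/providers/providers.py | get_pace_score_details
-- ===== SOURCE A (Python) =====
-- def get_pace_score_details(pace_score):
--     score_details = {
--         "segments": [
--             {
--                 "description": "Bad",
--                 "pace_score_range": [0, 100],
--                 "details": "Your pace was too slow and hence challenging to follow; it lacked a natural rhythm. Focus on pacing that matches the content and audience's needs."
--             },
--             {
--                 "description": "Average",
--                 "pace_score_range": [100, 140],
--                 "details": "Your pace was slightly slower than the normal pace of speaking, with some moments of inconsistency. Work on maintaining a steady flow for better delivery."
--             },
--             {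
--                 "description": "Good",
--                 "pace_score_range": [140, 160],
--                 "details": "Your pace was excellent, well-balanced, and easy to follow. Keep up the great tempo."
--             },
--             {
--                 "description": "Average",
--                 "pace_score_range": [160, 200],
--                 "details": "Your pace was slightly faster than the normal pace of speaking, making your speech somewhat difficult to follow. Practice maintaining a consistent tempo throughout."
--             },
--             {
--                 "description": "Bad",
--                 "pace_score_range": [200, 500],
--                 "details": "Your pace needs improvement as it was too fast to follow. Aim for a more consistent and balanced delivery."
--             },
--         ]
--     }
--     segments = score_details["segments"]
--
--     for segment in segments:
--         score_range = segment["pace_score_range"]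
--         if score_range[0] <= pace_score < score_range[1]:
--             return segment["description"], segment["details"]
--
--     return "Unknown", "Pace score outside the specified range."
-- ===== SOURCE B (Python) =====
-- _BOUNDS = [0, 100, 140, 160, 200, 500]
--
-- _ENTRIES = [
--     ("Bad", "Your pace was too slow and hence challenging to follow; it lacked a natural rhythm. Focus on pacing that matches the content and audience's needs."),
--     ("Average", "Your pace was slightly slower than the normal pace of speaking, with some moments of inconsistency. Work on maintaining a steady flow for better delivery."),
--     ("Good", "Your pace was excellent, well-balanced, and easy to follow. Keep up the great tempo."),
--     ("Average", "Your pace was slightly faster than the normal pace of speaking, making your speech somewhat difficult to follow. Practice maintaining a consistent tempo throughout."),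
--     ("Bad", "Your pace needs improvement as it was too fast to follow. Aim for a more consistent and balanced delivery."),
-- ]
--
--
-- def get_pace_score_details(pace_score):
--     # binary search: lo ends as bisect_right(_BOUNDS, pace_score)
--     lo, hi = 0, len(_BOUNDS)
--     while lo < hi:
--         mid = (lo + hi) // 2
--         if _BOUNDS[mid] <= pace_score:
--             lo = mid + 1
--         else:
--             hi = mid
--     idx = lo - 1
--     if 0 <= idx < len(_ENTRIES):
--         return _ENTRIES[idx]
--     return ("Unknown", "Pace score outside the specified range.")
-- ===== Notes on version B (the rewrite author's own statement) =====
-- stated objective: alternative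
-- what changed: Replaces the linear first-match scan over segment dicts with a hand-written bisect_right binary search over a boundary array, indexing a parallel list of (description, details) tuples.
import Mathlib
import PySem

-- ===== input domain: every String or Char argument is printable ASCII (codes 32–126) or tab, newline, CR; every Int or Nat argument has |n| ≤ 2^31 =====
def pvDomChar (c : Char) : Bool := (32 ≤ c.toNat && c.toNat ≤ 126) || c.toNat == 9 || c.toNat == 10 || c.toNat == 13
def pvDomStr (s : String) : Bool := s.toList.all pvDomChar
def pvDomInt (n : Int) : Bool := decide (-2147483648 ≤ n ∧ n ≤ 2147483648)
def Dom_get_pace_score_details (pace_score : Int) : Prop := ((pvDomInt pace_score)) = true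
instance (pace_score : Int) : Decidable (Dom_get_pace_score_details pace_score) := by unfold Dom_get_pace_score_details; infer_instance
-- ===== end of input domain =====

-- B replaces A's linear scan over segment records by a binary search over the boundary array (alternative structure, same result).

-- ===== PORT A =====
-- A's segment list: ((low, high), description, details), in A's order.
def pvSegmentsA : List ((Int × Int) × String × String) :=
  [ ((0, 100), "Bad", "Your pace was too slow and hence challenging to follow; it lacked a natural rhythm. Focus on pacing that matches the content and audience's needs."),
    ((100, 140), "Average", "Your pace was slightly slower than the normal pace of speaking, with some moments of inconsistency. Work on maintaining a steady flow for better delivery."),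
    ((140, 160), "Good", "Your pace was excellent, well-balanced, and easy to follow. Keep up the great tempo."),
    ((160, 200), "Average", "Your pace was slightly faster than the normal pace of speaking, making your speech somewhat difficult to follow. Practice maintaining a consistent tempo throughout."),
    ((200, 500), "Bad", "Your pace needs improvement as it was too fast to follow. Aim for a more consistent and balanced delivery.") ]

-- A's for-loop with first-match early return, then the fallback.
def pvScanA (pace_score : Int) : List ((Int × Int) × String × String) → String × String
  | [] => ("Unknown", "Pace score outside the specified range.")
  | ((lo, hi), desc, det) :: rest =>
      if lo ≤ pace_score ∧ pace_score < hi then (desc, det) else pvScanA pace_score rest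

def get_pace_score_details (pace_score : Int) : String × String :=
  pvScanA pace_score pvSegmentsA

-- ===== PORT B =====
def pvBounds : List Int := [0, 100, 140, 160, 200, 500]

def pvEntries : List (String × String) :=
  [ ("Bad", "Your pace was too slow and hence challenging to follow; it lacked a natural rhythm. Focus on pacing that matches the content and audience's needs."),
    ("Average", "Your pace was slightly slower than the normal pace of speaking, with some moments of inconsistency. Work on maintaining a steady flow for better delivery."),
    ("Good", "Your pace was excellent, well-balanced, and easy to follow. Keep up the great tempo."),
    ("Average", "Your pace was slightly faster than the normal pace of speaking, making your speech somewhat difficult to follow. Practice maintaining a consistent tempo throughout."),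
    ("Bad", "Your pace needs improvement as it was too fast to follow. Aim for a more consistent and balanced delivery.") ]

-- Source B's while-loop binary search (bisect_right): returns the final lo.
def pvBisect (x : Int) (lo hi : Nat) : Nat :=
  if _h : lo < hi then
    let mid := (lo + hi) / 2
    if pvBounds.getD mid 0 ≤ x then pvBisect x (mid + 1) hi else pvBisect x lo mid
  else lo
termination_by hi - lo
decreasing_by all_goals omega

def get_pace_score_details_alt (pace_score : Int) : String × String :=
  let lo := pvBisect pace_score 0 pvBounds.length
  let idx : Int := (lo : Int) - 1
  if 0 ≤ idx ∧ idx < (pvEntries.length : Int) then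
    pvEntries.getD (lo - 1) ("", "")
  else
    ("Unknown", "Pace score outside the specified range.")

-- ===== PRECONDITION & SPEC =====
def Spec_get_pace_score_details (pace_score : Int) (out : String × String) : Prop := out = get_pace_score_details_alt pace_score
instance (pace_score : Int) (out : String × String) : Decidable (Spec_get_pace_score_details pace_score out) := by unfold Spec_get_pace_score_details; infer_instance

-- ===== CLAIM (what is proved, stated in full; the proofs are below) =====
def Claim_equal_get_pace_score_details : Prop := ∀ (pace_score : Int), Dom_get_pace_score_details pace_score → Spec_get_pace_score_details pace_score (get_pace_score_details pace_score)

-- ===== LEMMAS AND PROOFS =====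

-- Value of the binary search on each interval of x (guards discharged by the interval facts).
theorem pvBisect_val_0 (x : Int) (h : x < 0) : pvBisect x 0 6 = 0 := by
  simp [pvBisect, pvBounds, show ¬(160:Int) ≤ x from by omega,
    show ¬(100:Int) ≤ x from by omega, show ¬(0:Int) ≤ x from by omega]
theorem pvBisect_val_1 (x : Int) (h1 : 0 ≤ x) (h2 : x < 100) : pvBisect x 0 6 = 1 := by
  simp [pvBisect, pvBounds, show ¬(160:Int) ≤ x from by omega,
    show ¬(100:Int) ≤ x from by omega, h1]
theorem pvBisect_val_2 (x : Int) (h1 : 100 ≤ x) (h2 : x < 140) : pvBisect x 0 6 = 2 := by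
  simp [pvBisect, pvBounds, show ¬(160:Int) ≤ x from by omega,
    show ¬(140:Int) ≤ x from by omega, h1]
theorem pvBisect_val_3 (x : Int) (h1 : 140 ≤ x) (h2 : x < 160) : pvBisect x 0 6 = 3 := by
  simp [pvBisect, pvBounds, show ¬(160:Int) ≤ x from by omega,
    show (100:Int) ≤ x from by omega, h1]
theorem pvBisect_val_4 (x : Int) (h1 : 160 ≤ x) (h2 : x < 200) : pvBisect x 0 6 = 4 := by
  simp [pvBisect, pvBounds, show ¬(500:Int) ≤ x from by omega,
    show ¬(200:Int) ≤ x from by omega, h1]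
theorem pvBisect_val_5 (x : Int) (h1 : 200 ≤ x) (h2 : x < 500) : pvBisect x 0 6 = 5 := by
  simp [pvBisect, pvBounds, show ¬(500:Int) ≤ x from by omega,
    show (160:Int) ≤ x from by omega, h1]
theorem pvBisect_val_6 (x : Int) (h1 : 500 ≤ x) : pvBisect x 0 6 = 6 := by
  simp [pvBisect, pvBounds, show (500:Int) ≤ x from h1,
    show (160:Int) ≤ x from by omega]

-- ===== VERDICT (by name: the statement is the Claim_ definition above) =====
theorem get_pace_score_details_spec : Claim_equal_get_pace_score_details := by
  intro x _
  unfold Spec_get_pace_score_details get_pace_score_details get_pace_score_details_alt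
  show pvScanA x pvSegmentsA = _
  rcases Int.lt_or_le x 0 with h | h0
  · rw [show pvBounds.length = 6 from rfl, pvBisect_val_0 x h]
    simp [pvScanA, pvSegmentsA, pvEntries]
    split_ifs <;> first | rfl | omega
  · rcases Int.lt_or_le x 100 with h | h1
    · rw [show pvBounds.length = 6 from rfl, pvBisect_val_1 x h0 h]
      simp [pvScanA, pvSegmentsA, pvEntries]
      split_ifs <;> first | rfl | omega
    · rcases Int.lt_or_le x 140 with h | h2
      · rw [show pvBounds.length = 6 from rfl, pvBisect_val_2 x h1 h]
        simp [pvScanA, pvSegmentsA, pvEntries]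
        split_ifs <;> first | rfl | omega
      · rcases Int.lt_or_le x 160 with h | h3
        · rw [show pvBounds.length = 6 from rfl, pvBisect_val_3 x h2 h]
          simp [pvScanA, pvSegmentsA, pvEntries]
          split_ifs <;> first | rfl | omega
        · rcases Int.lt_or_le x 200 with h | h4
          · rw [show pvBounds.length = 6 from rfl, pvBisect_val_4 x h3 h]
            simp [pvScanA, pvSegmentsA, pvEntries]
            split_ifs <;> first | rfl | omega
          · rcases Int.lt_or_le x 500 with h | h5
            · rw [show pvBounds.length = 6 from rfl, pvBisect_val_5 x h4 h]
              simp [pvScanA, pvSegmentsA, pvEntries]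
              split_ifs <;> first | rfl | omega
            · rw [show pvBounds.length = 6 from rfl, pvBisect_val_6 x h5]
              simp [pvScanA, pvSegmentsA, pvEntries]
              split_ifs <;> first | rfl | omega
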